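-- pv_equiv track=rewrite | github.com/dreaminate/my_exercises_documents | code practical projects/2024.11.3/幂次方.py | assign
-- ===== SOURCE A (Python) =====
-- def assign(n):
--     if n ==1:
--         return "2(0)"
--     if n ==2:
--         return "2"
--     if n ==3:
--         return "2+2(0)"
--     if n!=2:
--         d=n
--         list_01=[]
--         while d:
--             list_01.append(d%2)
--             d=d//2
--         out=""
--         for i in range(len(list_01)-1,1,-1):
--             if list_01[i] == 0:
--                 continue
--             if list_01[i] != 0 and i==len(list_01)-1:
--                 out=f"2({assign(i)})"
--             if list_01[i] != 0 and i <len(list_01)-1: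
--                 out=out+"+"+f"2({assign(i)})"
--         if list_01[1] !=0 :
--             out =out +"+"+"2"
--         if list_01[0] != 0:
--             out =out +"+"+"2(0)"
--         return out
-- ===== SOURCE B (Python) =====
-- def assign(n):
--     e = n.bit_length() - 1
--     if e == 0:
--         term = "2(0)"
--     elif e == 1:
--         term = "2"
--     else:
--         term = "2(" + assign(e) + ")"
--     r = n - (1 << e)
--     return term if r == 0 else term + "+" + assign(r)
-- ===== Notes on version B (the rewrite author's own statement) =====
-- stated objective: simpler
-- what changed: B replaces A's bit-list extraction (build the list of binary digits, scan it from the top index with extra early-return branches for tiny inputs and separate handling of the two lowest bits) by a direct recursion on the value: take the highest power e = n.bit_length()-1, emit its term, and recurse on the remainder after subtracting that power; no list, no index loop, no special cases.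
-- outside the precondition, e.g. on assign(0): A raises IndexError, B raises RecursionError; on assign(-3): A does not finish within the time limit, B raises RecursionError; on assign(-1): A does not finish within the time limit, B raises RecursionError
import Mathlib
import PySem

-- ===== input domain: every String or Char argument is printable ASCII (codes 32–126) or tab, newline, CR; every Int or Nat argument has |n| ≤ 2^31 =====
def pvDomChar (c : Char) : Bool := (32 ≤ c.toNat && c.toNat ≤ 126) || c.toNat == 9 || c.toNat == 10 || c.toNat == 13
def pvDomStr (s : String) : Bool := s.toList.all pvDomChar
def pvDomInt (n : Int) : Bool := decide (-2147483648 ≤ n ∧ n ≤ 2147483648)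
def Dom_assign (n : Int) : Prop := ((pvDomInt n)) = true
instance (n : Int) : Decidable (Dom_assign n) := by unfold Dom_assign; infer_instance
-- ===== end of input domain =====

-- B recurses on the value (top power 2^e, then the remainder) instead of extracting the whole
-- bit list first and scanning it; same return value, shorter and plainer (objective: simpler).

-- ===== PORT A =====
-- 'while d: list_01.append(d % 2); d = d // 2' — fuel makes the loop total in Lean; for the
-- inputs admitted by Pre_ (positive n) fuel n.toNat never runs out (Python diverges on negative d).
def pyBits : Nat → Int → List Int
  | 0, _ => []
  | f + 1, d =>
    if d ≠ 0 then PySem.Int.mod d 2 :: pyBits f (PySem.Int.floordiv d 2) else []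

-- Literal port of A; structural recursion on fuel replaces Python's unbounded recursion
-- (fuel n.toNat suffices for every n ≥ 1, since all recursive calls are on smaller positive values).
-- The final 'else ""' arm is Python's implicit fall-through (unreachable: that input already returned from an earlier branch).
def assignF : Nat → Int → String
  | 0, _ => ""
  | f + 1, n =>
    if n = 1 then "2(0)"
    else if n = 2 then "2"
    else if n = 3 then "2+2(0)"
    else if n ≠ 2 then
      let l := pyBits (f + 1) n
      let out : String :=
        (PySem.List.pyRange (PySem.List.len l - 1) 1 (-1)).foldl
          (fun out i =>
            if PySem.List.pyGetD l i 0 = 0 then out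
            else
              let out :=
                if PySem.List.pyGetD l i 0 ≠ 0 ∧ i = PySem.List.len l - 1 then
                  "2(" ++ assignF f i ++ ")"
                else out
              if PySem.List.pyGetD l i 0 ≠ 0 ∧ i < PySem.List.len l - 1 then
                out ++ "+" ++ ("2(" ++ assignF f i ++ ")")
              else out)
          ""
      let out := if PySem.List.pyGetD l 1 0 ≠ 0 then out ++ "+" ++ "2" else out
      if PySem.List.pyGetD l 0 0 ≠ 0 then out ++ "+" ++ "2(0)" else out
    else ""

def assign (n : Int) : String := assignF n.toNat n

-- ===== PORT B =====
-- n.bit_length() is PySem.Int.bitLength; 1 << e is 1 <<< e.toNat (exact for e ≥ 0, i.e. n ≥ 1;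
-- Python raises on a negative shift, outside Pre_). Fuel as for A.
def assignAltF : Nat → Int → String
  | 0, _ => ""
  | f + 1, n =>
    let e : Int := (PySem.Int.bitLength n : Int) - 1
    let term : String :=
      if e = 0 then "2(0)"
      else if e = 1 then "2"
      else "2(" ++ assignAltF f e ++ ")"
    let r : Int := n - (1 <<< e.toNat)
    if r = 0 then term else term ++ "+" ++ assignAltF f r

def assign_alt (n : Int) : String := assignAltF n.toNat n

-- ===== PRECONDITION & SPEC =====
-- Python A raises IndexError at zero and loops forever on negative input (B never returns there
-- either), so exactly the positive inputs are admitted.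
def Pre_assign (n : Int) : Prop := 1 ≤ n
instance (n : Int) : Decidable (Pre_assign n) := by unfold Pre_assign; infer_instance
def pvWitness_assign : Int := 5

def Spec_assign (n : Int) (out : String) : Prop := out = assign_alt n
instance (n : Int) (out : String) : Decidable (Spec_assign n out) := by unfold Spec_assign; infer_instance

-- ===== CLAIM (what is proved, stated in full; the proofs are below) =====
def Claim_equal_assign : Prop := ∀ (n : Int), Dom_assign n → Pre_assign n → Spec_assign n (assign n)

-- ===== LEMMAS AND PROOFS =====

-- bit i of m, as A's list indexing and B's arithmetic both see it
def bitI (m : Nat) (i : Int) : Int := ((m / 2 ^ i.toNat % 2 : Nat) : Int)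

lemma pyBits_zero (f : Nat) : pyBits f 0 = [] := by
  cases f <;> simp [pyBits]

lemma pyBits_getD (f : Nat) : ∀ (m i : Nat), m ≤ f →
    (pyBits f (m : Int)).getD i 0 = ((m / 2 ^ i % 2 : Nat) : Int) := by
  induction f with
  | zero =>
    intro m i hm
    have : m = 0 := by omega
    subst this
    simp [pyBits]
  | succ f ih =>
    intro m i hm
    rcases Nat.eq_zero_or_pos m with h0 | h0
    · subst h0; simp [pyBits]
    · have hne : (m : Int) ≠ 0 := by exact_mod_cast Nat.one_le_iff_ne_zero.mp h0
      simp only [pyBits, hne, if_pos, ne_eq, not_false_eq_true]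
      cases i with
      | zero =>
        simp
      | succ i =>
        simp only [List.getD_cons_succ]
        rw [show PySem.Int.floordiv (m : Int) 2 = ((m / 2 : Nat) : Int) from
          by exact_mod_cast PySem.Int.floordiv_natCast m 2]
        rw [ih (m / 2) i (by omega)]
        congr 2
        rw [Nat.div_div_eq_div_mul]
        congr 1
        rw [pow_succ']

lemma pyBits_len (f : Nat) : ∀ m : Nat, 1 ≤ m → m ≤ f →
    (pyBits f (m : Int)).length = PySem.Int.bitLength (m : Int) := by
  induction f with
  | zero => intro m h1 h2; omega
  | succ f ih =>
    intro m h1 h2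
    have hne : (m : Int) ≠ 0 := by exact_mod_cast Nat.one_le_iff_ne_zero.mp h1
    simp only [pyBits, hne, ne_eq, not_false_eq_true, if_true, List.length_cons]
    rw [show PySem.Int.floordiv (m : Int) 2 = ((m / 2 : Nat) : Int) from
      by exact_mod_cast PySem.Int.floordiv_natCast m 2]
    rw [PySem.Int.bitLength_natCast h1]
    rcases Nat.eq_zero_or_pos (m / 2) with h0 | h0
    · rw [h0]; simp [pyBits_zero, PySem.Int.bitLength_zero]
    · rw [ih (m / 2) h0 (by omega)]

lemma bitLength_le_self (m : Nat) (h : 1 ≤ m) : PySem.Int.bitLength (m : Int) ≤ m := by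
  induction m using Nat.strong_induction_on with
  | _ m ih =>
    rw [PySem.Int.bitLength_natCast h]
    rcases Nat.lt_or_ge m 2 with h2 | h2
    · interval_cases m
      simp [PySem.Int.bitLength_zero]
    · have := ih (m / 2) (by omega) (by omega)
      omega

lemma bitLength_pos (m : Nat) (h : 1 ≤ m) : 1 ≤ PySem.Int.bitLength (m : Int) := by
  rw [PySem.Int.bitLength_natCast h]; omega

lemma two_pow_le (m : Nat) (h : 1 ≤ m) : 2 ^ (PySem.Int.bitLength (m : Int) - 1) ≤ m := by
  have hne : (m : Int) ≠ 0 := by exact_mod_cast Nat.one_le_iff_ne_zero.mp h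
  simpa using PySem.Int.two_pow_bitLength_le (m : Int) hne

lemma lt_two_pow (m : Nat) : m < 2 ^ PySem.Int.bitLength (m : Int) := by
  simpa using PySem.Int.lt_two_pow_bitLength (m : Int)

lemma top_bit (m : Nat) (h : 1 ≤ m) :
    m / 2 ^ (PySem.Int.bitLength (m : Int) - 1) % 2 = 1 := by
  have a := two_pow_le m h
  have b := lt_two_pow m
  have hL := bitLength_pos m h
  have hdiv : m / 2 ^ (PySem.Int.bitLength (m : Int) - 1) = 1 := by
    apply Nat.div_eq_of_lt_le (by omega)
    have : 2 ^ PySem.Int.bitLength (m : Int) =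
        2 * 2 ^ (PySem.Int.bitLength (m : Int) - 1) := by
      rw [← pow_succ']; congr 1; omega
    omega
  rw [hdiv]

lemma bitLength_eq (r k : Nat) (h1 : 2 ^ k ≤ r) (h2 : r < 2 ^ (k + 1)) :
    PySem.Int.bitLength (r : Int) = k + 1 := by
  have hr : 1 ≤ r := le_trans Nat.one_le_two_pow h1
  have a := two_pow_le r hr
  have b := lt_two_pow r
  have hL := bitLength_pos r hr
  have h3 : PySem.Int.bitLength (r : Int) - 1 < k + 1 :=
    (Nat.pow_lt_pow_iff_right (by omega)).mp (lt_of_le_of_lt a h2)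
  have h4 : k < PySem.Int.bitLength (r : Int) :=
    (Nat.pow_lt_pow_iff_right (by omega)).mp (lt_of_le_of_lt h1 b)
  omega

-- bits below the top power are unchanged by subtracting it
lemma low_bit (e i r : Nat) (hi : i < e) :
    (2 ^ e + r) / 2 ^ i % 2 = r / 2 ^ i % 2 := by
  have he : 2 ^ e = 2 ^ i * (2 * 2 ^ (e - i - 1)) := by
    rw [← pow_succ', ← pow_add]; congr 1; omega
  rw [he, Nat.add_comm, Nat.add_mul_div_left _ _ (Nat.two_pow_pos i)]
  omega

-- one unfolding step of the B port, in Nat form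
lemma altF_unfold (f : Nat) (m : Nat) (h1 : 1 ≤ m) :
    assignAltF (f + 1) (m : Int) =
      (if PySem.Int.bitLength (m : Int) - 1 = 0 then "2(0)"
       else if PySem.Int.bitLength (m : Int) - 1 = 1 then "2"
       else "2(" ++ assignAltF f ((PySem.Int.bitLength (m : Int) - 1 : Nat) : Int) ++ ")") ++
      (if m - 2 ^ (PySem.Int.bitLength (m : Int) - 1) = 0 then ""
       else "+" ++ assignAltF f ((m - 2 ^ (PySem.Int.bitLength (m : Int) - 1) : Nat) : Int)) := by
  have hL : 1 ≤ PySem.Int.bitLength (m : Int) := by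
    rw [PySem.Int.bitLength_natCast h1]; omega
  have htp : 2 ^ (PySem.Int.bitLength (m : Int) - 1) ≤ m := by
    have hne : (m : Int) ≠ 0 := by exact_mod_cast Nat.one_le_iff_ne_zero.mp h1
    simpa using PySem.Int.two_pow_bitLength_le (m : Int) hne
  set L := PySem.Int.bitLength (m : Int) with hLdef
  simp only [assignAltF]
  have he : ((L : Int) - 1) = ((L - 1 : Nat) : Int) := by omega
  have het : ((L : Int) - 1).toNat = L - 1 := by omega
  have hshift : ((1 : Nat) <<< (L - 1)) = (2 ^ (L - 1) : Nat) := Nat.one_shiftLeft _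
  rw [het, hshift]
  have hr : (m : Int) - ((2 ^ (L - 1) : Nat) : Int) = ((m - 2 ^ (L - 1) : Nat) : Int) := by
    omega
  rw [hr, he]
  simp only [Nat.cast_eq_zero, Nat.cast_eq_one]
  by_cases h0 : L - 1 = 0 <;> by_cases h1' : L - 1 = 1 <;>
    by_cases hr0 : m - 2 ^ (L - 1) = 0 <;> simp [h0, h1', hr0] <;> simp_all [← String.append_assoc]

-- fuel irrelevance for the B port
lemma altF_fuel : ∀ (m : Nat), ∀ f g : Nat, 1 ≤ m → m ≤ f → m ≤ g →
    assignAltF f (m : Int) = assignAltF g (m : Int) := by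
  intro m
  induction m using Nat.strong_induction_on with
  | _ m ih =>
    intro f g h1 hf hg
    obtain ⟨f', rfl⟩ : ∃ f', f = f' + 1 := ⟨f - 1, by omega⟩
    obtain ⟨g', rfl⟩ : ∃ g', g = g' + 1 := ⟨g - 1, by omega⟩
    rw [altF_unfold f' m h1, altF_unfold g' m h1]
    have hLm := bitLength_le_self m h1
    have hL : 1 ≤ PySem.Int.bitLength (m : Int) := by
      rw [PySem.Int.bitLength_natCast h1]; omega
    set L := PySem.Int.bitLength (m : Int) with hLdef
    have hterm : (if L - 1 = 0 then "2(0)" else if L - 1 = 1 then "2"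
        else "2(" ++ assignAltF f' ((L - 1 : Nat) : Int) ++ ")") =
        (if L - 1 = 0 then "2(0)" else if L - 1 = 1 then "2"
        else "2(" ++ assignAltF g' ((L - 1 : Nat) : Int) ++ ")") := by
      by_cases h0 : L - 1 = 0 <;> by_cases h1' : L - 1 = 1 <;> simp [h0, h1']
      rw [ih (L - 1) (by omega) f' g' (by omega) (by omega) (by omega)]
    have hrw : (if m - 2 ^ (L - 1) = 0 then ""
        else "+" ++ assignAltF f' ((m - 2 ^ (L - 1) : Nat) : Int)) =
        (if m - 2 ^ (L - 1) = 0 then ""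
        else "+" ++ assignAltF g' ((m - 2 ^ (L - 1) : Nat) : Int)) := by
      by_cases hr0 : m - 2 ^ (L - 1) = 0 <;> simp [hr0]
      have h2p : 1 ≤ 2 ^ (L - 1) := Nat.one_le_two_pow
      rw [ih (m - 2 ^ (L - 1)) (by omega) f' g' (by omega) (by omega) (by omega)]
    rw [hterm, hrw]

-- the tail of A's loop (positions b … 2 plus the two trailing ifs), read off r's bits
def tailRun (r b : Nat) (acc : String) : String :=
  let out := (PySem.List.pyRange (b : Int) 1 (-1)).foldl
    (fun out i => if bitI r i = 0 then out
                  else out ++ "+" ++ ("2(" ++ assignAltF i.toNat i ++ ")")) acc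
  let out := if bitI r 1 ≠ 0 then out ++ "+" ++ "2" else out
  if bitI r 0 ≠ 0 then out ++ "+" ++ "2(0)" else out

lemma tailRun_eq : ∀ (b r : Nat) (acc : String), r < 2 ^ (b + 1) →
    tailRun r b acc = if r = 0 then acc else acc ++ "+" ++ assignAltF r (r : Int) := by
  intro b
  induction b with
  | zero =>
    intro r acc hr
    interval_cases r
    · simp [tailRun, bitI, PySem.List.pyRange_neg_one_eq_nil]
    · have h1 : assignAltF 1 (1 : Int) = "2(0)" := by decide
      simp [tailRun, bitI, PySem.List.pyRange_neg_one_eq_nil, h1]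
  | succ b ih =>
    intro r acc hr
    rcases Nat.eq_zero_or_pos b with hb0 | hb1
    · subst hb0
      have h1 : assignAltF 1 (1 : Int) = "2(0)" := by decide
      have h2 : assignAltF 2 (2 : Int) = "2" := by decide
      have h3 : assignAltF 3 (3 : Int) = "2+2(0)" := by decide
      interval_cases r
      · simp [tailRun, bitI]
      · simp [tailRun, bitI, h1]
      · simp [tailRun, bitI, h2]
      · simp [tailRun, bitI, h3, String.append_assoc]
    · -- b ≥ 1
      have hcons : PySem.List.pyRange ((b + 1 : Nat) : Int) 1 (-1) =
          ((b + 1 : Nat) : Int) :: PySem.List.pyRange (((b + 1 : Nat) : Int) - 1) 1 (-1) :=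
        PySem.List.pyRange_neg_one_cons (by push_cast; omega)
      have hshift : (((b + 1 : Nat) : Int) - 1) = ((b : Nat) : Int) := by push_cast; ring
      by_cases htop : r < 2 ^ (b + 1)
      · -- top bit of r at position b+1 is 0
        have hbit : bitI r ((b + 1 : Nat) : Int) = 0 := by
          simp [bitI, Nat.div_eq_of_lt htop]
        have hstep : tailRun r (b + 1) acc = tailRun r b acc := by
          simp only [tailRun, hcons, List.foldl_cons, hbit, hshift, if_true]
        rw [hstep, ih r acc htop]
      · -- top bit is 1
        rw [not_lt] at htop
        set r' := r - 2 ^ (b + 1) with hr'def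
        have hrsplit : r = 2 ^ (b + 1) + r' := by omega
        have hpow : 2 ^ (b + 1 + 1) = 2 ^ (b + 1) + 2 ^ (b + 1) := by ring
        have hr'lt : r' < 2 ^ (b + 1) := by omega
        have hdiv : r / 2 ^ (b + 1) = 1 := by
          apply Nat.div_eq_of_lt_le
          · simpa using htop
          · have h2 : (1 + 1) * 2 ^ (b + 1) = 2 ^ (b + 1) + 2 ^ (b + 1) := by ring
            omega
        have hbit1 : bitI r ((b + 1 : Nat) : Int) = 1 := by
          simp [bitI, hdiv]
        have hlow : ∀ i : Nat, i < b + 1 → bitI r ((i : Nat) : Int) = bitI r' ((i : Nat) : Int) := by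
          intro i hi
          simp only [bitI, Int.toNat_natCast]
          rw [hrsplit, low_bit _ _ _ hi]
        have hfold2 : ∀ acc0 : String,
            (PySem.List.pyRange ((b : Nat) : Int) 1 (-1)).foldl
              (fun out i => if bitI r i = 0 then out
                            else out ++ "+" ++ ("2(" ++ assignAltF i.toNat i ++ ")")) acc0 =
            (PySem.List.pyRange ((b : Nat) : Int) 1 (-1)).foldl
              (fun out i => if bitI r' i = 0 then out
                            else out ++ "+" ++ ("2(" ++ assignAltF i.toNat i ++ ")")) acc0 := by
          intro acc0
          apply PySem.List.foldl_congr_mem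
          intro a x hx
          obtain ⟨hx1, hx2⟩ := (PySem.List.mem_pyRange_neg_one).mp hx
          have hxn : x = ((x.toNat : Nat) : Int) := by omega
          rw [hxn, hlow x.toNat (by omega)]
        have hlow1 : bitI r 1 = bitI r' 1 := by simpa using hlow 1 (by omega)
        have hlow0 : bitI r 0 = bitI r' 0 := by simpa using hlow 0 (by omega)
        have hstep : tailRun r (b + 1) acc =
            tailRun r' b (acc ++ "+" ++ ("2(" ++ assignAltF (b + 1) ((b + 1 : Nat) : Int) ++ ")")) := by
          simp only [tailRun, hcons, List.foldl_cons, hshift, hbit1, hlow1, hlow0]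
          norm_num
          simp only [hfold2]
        rw [hstep, ih r' _ hr'lt]
        have hr1 : 1 ≤ r := by omega
        have hbl : PySem.Int.bitLength (r : Int) = b + 2 := bitLength_eq r (b + 1) htop (by omega)
        have hb2 : b + 1 < 2 ^ (b + 1) := Nat.lt_two_pow_self
        have hmain : assignAltF r (r : Int) =
            ("2(" ++ assignAltF (b + 1) ((b + 1 : Nat) : Int) ++ ")") ++
            (if r' = 0 then "" else "+" ++ assignAltF r' ((r' : Nat) : Int)) := by
          obtain ⟨t, ht⟩ : ∃ t, r = t + 1 := ⟨r - 1, by omega⟩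
          have h := altF_unfold t r (by omega)
          rw [← ht] at h
          rw [hbl] at h
          rw [show b + 2 - 1 = b + 1 from rfl] at h
          have e1 : assignAltF t ((b + 1 : Nat) : Int) = assignAltF (b + 1) ((b + 1 : Nat) : Int) :=
            altF_fuel (b + 1) t (b + 1) (by omega) (by omega) (by omega)
          have e2 : (if r - 2 ^ (b + 1) = 0 then ""
              else "+" ++ assignAltF t ((r - 2 ^ (b + 1) : Nat) : Int)) =
              (if r' = 0 then "" else "+" ++ assignAltF r' ((r' : Nat) : Int)) := by
            rw [← hr'def]
            rcases Nat.eq_zero_or_pos r' with h0 | h0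
            · simp [h0]
            · simp only [if_neg (show ¬ r' = 0 by omega)]
              rw [altF_fuel r' t r' (by omega) (by omega) (by omega)]
          rw [e1, e2] at h
          rw [if_neg (show ¬ b + 1 = 0 by omega), if_neg (show ¬ b + 1 = 1 by omega)] at h
          exact h
        rw [if_neg (by omega : ¬ r = 0), hmain]
        by_cases h0 : r' = 0
        · simp [h0, String.append_assoc]
        · simp [h0, String.append_assoc]
          rw [← String.append_assoc]
          rfl

lemma main_eq : ∀ (m : Nat), ∀ f : Nat, 1 ≤ m → m ≤ f →
    assignF f (m : Int) = assignAltF m (m : Int) := by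
  intro m
  induction m using Nat.strong_induction_on with
  | _ m ih =>
    intro f h1 hf
    obtain ⟨f', rfl⟩ : ∃ f', f = f' + 1 := ⟨f - 1, by omega⟩
    rcases Nat.lt_or_ge m 4 with h4 | h4
    · -- m ∈ {1,2,3}
      interval_cases m <;>
        · simp only [assignF]
          norm_num
          decide
    · -- m ≥ 4
      have hm1 : ¬((m : Int) = 1) := by omega
      have hm2 : ¬((m : Int) = 2) := by omega
      have hm3 : ¬((m : Int) = 3) := by omega
      set L := PySem.Int.bitLength (m : Int) with hLdef
      have hLm : L ≤ m := bitLength_le_self m h1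
      have hL3 : 3 ≤ L := by
        have hb := lt_two_pow m
        rw [← hLdef] at hb
        by_contra hc
        have hp : (2 : Nat) ^ L ≤ 2 ^ 2 := Nat.pow_le_pow_right (by norm_num) (by omega)
        norm_num at hp
        omega
      set e := L - 1 with hedef
      have he2 : 2 ≤ e := by omega
      have hlen : (pyBits (f' + 1) (m : Int)).length = L := pyBits_len (f' + 1) m h1 (by omega)
      have hgd : ∀ i : Int, 0 ≤ i → PySem.List.pyGetD (pyBits (f' + 1) (m : Int)) i 0 = bitI m i := by
        intro i hi
        have hxn : i = ((i.toNat : Nat) : Int) := by omega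
        rw [hxn, PySem.List.pyGetD_natCast, pyBits_getD (f' + 1) m i.toNat (by omega)]
        simp only [bitI, Int.toNat_natCast]
      have hlenI : PySem.List.len (pyBits (f' + 1) (m : Int)) - 1 = ((e : Nat) : Int) := by
        simp [PySem.List.len_eq, hlen]
        omega
      set r := m - 2 ^ e with hrdef
      have htp : 2 ^ e ≤ m := by
        have := two_pow_le m h1
        rw [← hLdef] at this
        exact this
      have hrsplit : m = 2 ^ e + r := by omega
      have hmlt : m < 2 ^ (e + 1) := by
        have := lt_two_pow m
        rw [← hLdef] at this
        rw [show e + 1 = L from by omega]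
        exact this
      have hrlt : r < 2 ^ e := by
        have : 2 ^ (e + 1) = 2 ^ e + 2 ^ e := by ring
        omega
      have hbite : bitI m ((e : Nat) : Int) = 1 := by
        have := top_bit m h1
        rw [← hLdef] at this
        simp only [bitI, Int.toNat_natCast, ← hedef] at this ⊢
        rw [this]
        norm_num
      have hblow : ∀ i : Int, 0 ≤ i → i < ((e : Nat) : Int) → bitI m i = bitI r i := by
        intro i h0 hlt
        have hxn : i = ((i.toNat : Nat) : Int) := by omega
        rw [hxn]
        simp only [bitI, Int.toNat_natCast]
        rw [hrsplit, low_bit e i.toNat r (by omega)]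
      have hget1 : PySem.List.pyGetD (pyBits (f' + 1) (m : Int)) 1 0 = bitI r 1 := by
        rw [hgd 1 (by norm_num)]
        have := hblow 1 (by norm_num) (by exact_mod_cast by omega)
        exact this
      have hget0 : PySem.List.pyGetD (pyBits (f' + 1) (m : Int)) 0 0 = bitI r 0 := by
        rw [hgd 0 le_rfl]
        exact hblow 0 le_rfl (by exact_mod_cast by omega)
      have hcons : PySem.List.pyRange ((e : Nat) : Int) 1 (-1) =
          ((e : Nat) : Int) :: PySem.List.pyRange (((e : Nat) : Int) - 1) 1 (-1) :=
        PySem.List.pyRange_neg_one_cons (by omega)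
      have hsh : (((e : Nat) : Int) - 1) = ((e - 1 : Nat) : Int) := by omega
      have hae : assignF f' ((e : Nat) : Int) = assignAltF e ((e : Nat) : Int) := by
        have := ih e (by omega) f' (by omega) (by omega)
        simpa using this
      have hfull : (PySem.List.pyRange ((e : Nat) : Int) 1 (-1)).foldl
          (fun out i =>
            if PySem.List.pyGetD (pyBits (f' + 1) (m : Int)) i 0 = 0 then out
            else
              if PySem.List.pyGetD (pyBits (f' + 1) (m : Int)) i 0 ≠ 0 ∧ i < ((e : Nat) : Int) then
                (if PySem.List.pyGetD (pyBits (f' + 1) (m : Int)) i 0 ≠ 0 ∧ i = ((e : Nat) : Int) then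
                  "2(" ++ assignF f' i ++ ")" else out) ++ "+" ++ ("2(" ++ assignF f' i ++ ")")
              else
                if PySem.List.pyGetD (pyBits (f' + 1) (m : Int)) i 0 ≠ 0 ∧ i = ((e : Nat) : Int) then
                  "2(" ++ assignF f' i ++ ")" else out) "" =
          (PySem.List.pyRange ((e - 1 : Nat) : Int) 1 (-1)).foldl
          (fun out i => if bitI r i = 0 then out
                        else out ++ "+" ++ ("2(" ++ assignAltF i.toNat i ++ ")"))
          ("2(" ++ assignAltF e ((e : Nat) : Int) ++ ")") := by
        rw [hcons, List.foldl_cons, hsh]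
        have hfirst :
            (if PySem.List.pyGetD (pyBits (f' + 1) (m : Int)) ((e : Nat) : Int) 0 = 0 then ("" : String)
            else
              if PySem.List.pyGetD (pyBits (f' + 1) (m : Int)) ((e : Nat) : Int) 0 ≠ 0 ∧ ((e : Nat) : Int) < ((e : Nat) : Int) then
                (if PySem.List.pyGetD (pyBits (f' + 1) (m : Int)) ((e : Nat) : Int) 0 ≠ 0 ∧ ((e : Nat) : Int) = ((e : Nat) : Int) then
                  "2(" ++ assignF f' ((e : Nat) : Int) ++ ")" else "") ++ "+" ++ ("2(" ++ assignF f' ((e : Nat) : Int) ++ ")")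
              else
                if PySem.List.pyGetD (pyBits (f' + 1) (m : Int)) ((e : Nat) : Int) 0 ≠ 0 ∧ ((e : Nat) : Int) = ((e : Nat) : Int) then
                  "2(" ++ assignF f' ((e : Nat) : Int) ++ ")" else "") =
            ("2(" ++ assignAltF e ((e : Nat) : Int) ++ ")") := by
          rw [hgd ((e : Nat) : Int) (by positivity), hbite]
          norm_num [hae]
        rw [hfirst]
        apply PySem.List.foldl_congr_mem
        intro acc x hx
        obtain ⟨hx1, hx2⟩ := (PySem.List.mem_pyRange_neg_one).mp hx
        have hxe : x < ((e : Nat) : Int) := by omega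
        have hxnat : x = ((x.toNat : Nat) : Int) := by omega
        have hb : PySem.List.pyGetD (pyBits (f' + 1) (m : Int)) x 0 = bitI r x := by
          rw [hgd x (by omega)]
          exact hblow x (by omega) hxe
        rw [hb]
        by_cases hz : bitI r x = 0
        · simp [hz]
        · have hax : assignF f' x = assignAltF x.toNat x := by
            conv_lhs => rw [hxnat]
            conv_rhs => rw [hxnat]
            simp only [Int.toNat_natCast]
            exact ih x.toNat (by omega) f' (by omega) (by omega)
          have hxne : ¬ x = ((e : Nat) : Int) := by omega
          simp only [if_neg hz, hax]
          rw [if_pos (And.intro hz hxe),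
            if_neg (fun hc : ¬bitI r x = 0 ∧ x = ((e : Nat) : Int) => hxne hc.2)]
      simp only [assignF, if_neg hm1, if_neg hm2, if_neg hm3, if_pos hm2, hlenI]
      rw [hget1, hget0, hfull]
      have ht := tailRun_eq (e - 1) r ("2(" ++ assignAltF e ((e : Nat) : Int) ++ ")")
        (by rw [show e - 1 + 1 = e from by omega]; exact hrlt)
      simp only [tailRun] at ht
      rw [ht]
      -- right-hand side
      obtain ⟨t, htm⟩ : ∃ t, m = t + 1 := ⟨m - 1, by omega⟩
      have h := altF_unfold t m h1
      rw [← htm, ← hLdef, ← hedef] at h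
      rw [if_neg (show ¬ e = 0 by omega), if_neg (show ¬ e = 1 by omega), ← hrdef] at h
      have e1 : assignAltF t ((e : Nat) : Int) = assignAltF e ((e : Nat) : Int) :=
        altF_fuel e t e (by omega) (by omega) (by omega)
      rw [e1] at h
      rw [h]
      rcases Nat.eq_zero_or_pos r with h0 | h0
      · simp [h0]
      · have e2 : assignAltF t ((r : Nat) : Int) = assignAltF r ((r : Nat) : Int) :=
          altF_fuel r t r (by omega) (by omega) (by omega)
      
        rw [if_neg (show ¬ r = 0 by omega), if_neg (show ¬ r = 0 by omega), e2]
        simp [String.append_assoc]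
        rw [← String.append_assoc]
        rfl

-- ===== VERDICT (by name: the statement is the Claim_ definition above) =====
theorem assign_spec : Claim_equal_assign := by
  intro n _ hpre
  unfold Spec_assign assign assign_alt
  have h1 : (1 : Int) ≤ n := hpre
  have hn : n = (n.toNat : Int) := by omega
  rw [hn]
  exact main_eq n.toNat n.toNat (by omega) le_rfl
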